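-- pv_equiv track=rewrite | github.com/greenblat/vlsistuff | pybin3/sdf_parser.py | gather0
-- ===== SOURCE A (Python) =====
-- def gather0(Toks):
--     Res = []
--     state = 'idle'
--     for tok in Toks:
--         if state=='idle':
--             if tok == '"':
--                 state = 'gather'
--                 part = ''
--             else:
--                 Res.append(tok)
--         elif state=='gather':
--             if (tok == '"'):
--                 Res.append(part)
--                 part=''
--                 state = 'idle'
--             else:
--                 part += ' '+tok
--
--     return Res
-- ===== SOURCE B (Python) =====
-- def gather0(Toks):
--     # Split into segments delimited by '"': even segments are outside quotes,
--     # odd segments are inside; then rebuild, joining each closed quoted group.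
--     segs = [[]]
--     for t in Toks:
--         if t == '"':
--             segs.append([])
--         else:
--             segs[-1].append(t)
--     res = list(segs[0])
--     rest = segs[1:]
--     while len(rest) >= 2:
--         inside, outside = rest[0], rest[1]
--         res.append(''.join(' ' + t for t in inside))
--         res.extend(outside)
--         rest = rest[2:]
--     return res
-- ===== Notes on version B (the rewrite author's own statement) =====
-- stated objective: alternative
-- what changed: Replaces A's idle/gather state machine with a two-phase decomposition: first split the token list into segments delimited by '"' tokens, then rebuild the result by emitting even segments verbatim and joining each properly closed odd segment with leading spaces (dropping an unterminated final group).
import Mathlib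
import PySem

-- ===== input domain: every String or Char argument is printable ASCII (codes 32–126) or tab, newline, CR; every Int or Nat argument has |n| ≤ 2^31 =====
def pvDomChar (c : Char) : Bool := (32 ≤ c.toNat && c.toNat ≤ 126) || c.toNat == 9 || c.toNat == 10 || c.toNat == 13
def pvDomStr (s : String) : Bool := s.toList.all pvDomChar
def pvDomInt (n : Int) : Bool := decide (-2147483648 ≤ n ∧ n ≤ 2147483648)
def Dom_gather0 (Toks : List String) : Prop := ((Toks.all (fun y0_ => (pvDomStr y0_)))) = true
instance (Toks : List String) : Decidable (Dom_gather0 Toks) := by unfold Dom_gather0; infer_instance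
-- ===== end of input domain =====

-- B replaces A's state machine by split-into-quote-delimited-segments then rejoin; same output, same cost (objective: alternative).

-- ===== PORT A =====
-- state machine over (Res, state, part), transliterating A's for-loop
def gather0 (Toks : List String) : List String :=
  (Toks.foldl (fun (acc : List String × String × String) tok =>
    let Res := acc.1; let state := acc.2.1; let part := acc.2.2
    if state = "idle" then
      if tok = "\"" then (Res, "gather", "")
      else (Res ++ [tok], state, part)
    else if state = "gather" then
      if tok = "\"" then (Res ++ [part], "idle", "")
      else (Res, state, part ++ " " ++ tok)
    else acc) ([], "idle", "")).1

-- ===== PORT B =====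
-- ''.join(' ' + t for t in inside)
def joinSp : List String → String
  | [] => ""
  | t :: ts => " " ++ t ++ joinSp ts

-- the while-loop over the remaining segments, consuming two at a time
def procPairs : List (List String) → List String
  | inside :: outside :: rest => joinSp inside :: outside ++ procPairs rest
  | _ => []

-- phase 2: first segment verbatim, then the pairwise while-loop
def rebuild (p : List (List String) × List String) : List String :=
  match p.1 ++ [p.2] with
  | [] => []
  | first :: rest => first ++ procPairs rest

def gather0_alt (Toks : List String) : List String :=
  -- phase 1: split on '"' into segments (foldl keeps (finished segments, current segment))
  rebuild (Toks.foldl (fun (acc : List (List String) × List String) t =>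
      if t = "\"" then (acc.1 ++ [acc.2], ([] : List String))
      else (acc.1, acc.2 ++ [t])) (([] : List (List String)), ([] : List String)))

-- ===== PRECONDITION & SPEC =====
def Spec_gather0 (Toks : List String) (out : List String) : Prop := out = gather0_alt Toks
instance (Toks : List String) (out : List String) : Decidable (Spec_gather0 Toks out) := by unfold Spec_gather0; infer_instance

-- ===== CLAIM (what is proved, stated in full; the proofs are below) =====
def Claim_equal_gather0 : Prop := ∀ (Toks : List String), Dom_gather0 Toks → Spec_gather0 Toks (gather0 Toks)

-- ===== LEMMAS AND PROOFS =====

-- reference state machine: none = 'idle', some part = 'gather'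
def gSt : Option String → List String → List String
  | _, [] => []
  | st, t :: ts =>
    match st with
    | none => if t = "\"" then gSt (some "") ts else t :: gSt none ts
    | some part => if t = "\"" then part :: gSt none ts else gSt (some (part ++ " " ++ t)) ts

-- reference splitter
def splitR (cur : List String) : List String → List (List String)
  | [] => [cur]
  | t :: ts => if t = "\"" then cur :: splitR [] ts else splitR (cur ++ [t]) ts

def FF : List (List String) → List String
  | [] => []
  | first :: rest => first ++ procPairs rest

def FFp (part : String) : List (List String) → List String
  | inside :: outside :: rest => (part ++ joinSp inside) :: outside ++ procPairs rest
  | _ => []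

theorem gather0_foldA (ts : List String) :
    (∀ Res part, (ts.foldl (fun (acc : List String × String × String) tok =>
        let Res := acc.1; let state := acc.2.1; let part := acc.2.2
        if state = "idle" then
          if tok = "\"" then (Res, "gather", "")
          else (Res ++ [tok], state, part)
        else if state = "gather" then
          if tok = "\"" then (Res ++ [part], "idle", "")
          else (Res, state, part ++ " " ++ tok)
        else acc) (Res, "idle", part)).1 = Res ++ gSt none ts) ∧
    (∀ Res part, (ts.foldl (fun (acc : List String × String × String) tok =>
        let Res := acc.1; let state := acc.2.1; let part := acc.2.2
        if state = "idle" then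
          if tok = "\"" then (Res, "gather", "")
          else (Res ++ [tok], state, part)
        else if state = "gather" then
          if tok = "\"" then (Res ++ [part], "idle", "")
          else (Res, state, part ++ " " ++ tok)
        else acc) (Res, "gather", part)).1 = Res ++ gSt (some part) ts) := by
  induction ts with
  | nil => simp [gSt]
  | cons t ts ih =>
    obtain ⟨ih1, ih2⟩ := ih
    constructor <;> intro Res part <;> by_cases h : t = "\"" <;>
      simp [gSt, h, ih1, ih2]

theorem splitFold (ts : List String) : ∀ (done : List (List String)) (cur : List String),
    (ts.foldl (fun (acc : List (List String) × List String) t =>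
        if t = "\"" then (acc.1 ++ [acc.2], ([] : List String))
        else (acc.1, acc.2 ++ [t])) (done, cur)).1 ++
    [(ts.foldl (fun (acc : List (List String) × List String) t =>
        if t = "\"" then (acc.1 ++ [acc.2], ([] : List String))
        else (acc.1, acc.2 ++ [t])) (done, cur)).2] = done ++ splitR cur ts := by
  induction ts with
  | nil => simp [splitR]
  | cons t ts ih =>
    intro done cur
    by_cases h : t = "\"" <;> simp [splitR, h, ih]

theorem rebuild_eq (p : List (List String) × List String) : rebuild p = FF (p.1 ++ [p.2]) := by
  cases hq : p.1 ++ [p.2] with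
  | nil => simp [rebuild, FF, hq]
  | cons f r => simp [rebuild, FF, hq]

theorem splitHead (ts : List String) : ∀ cur,
    splitR cur ts = (cur ++ (splitR ([] : List String) ts).headI) :: (splitR [] ts).tail := by
  induction ts with
  | nil => intro cur; simp [splitR]
  | cons t ts ih =>
    intro cur
    by_cases h : t = "\""
    · simp [splitR, h]
    · simp only [splitR, h, ite_false]
      rw [ih (cur ++ [t]), ih ([] ++ [t])]
      simp

theorem procPairs_eq_FFp_empty (L : List (List String)) : procPairs L = FFp "" L := by
  match L with
  | [] => simp [procPairs, FFp]
  | [x] => simp [procPairs, FFp]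
  | inside :: outside :: rest => simp [procPairs, FFp]

theorem gSt_eq_FF (ts : List String) :
    (gSt none ts = FF (splitR [] ts)) ∧
    (∀ part, gSt (some part) ts = FFp part (splitR [] ts)) := by
  induction ts with
  | nil => simp [gSt, splitR, FF, FFp, procPairs]
  | cons t ts ih =>
    obtain ⟨ih1, ih2⟩ := ih
    obtain ⟨h0, tl0, hsh⟩ : ∃ h0 tl0, splitR ([] : List String) ts = h0 :: tl0 :=
      ⟨_, _, splitHead ts []⟩
    have hsht : splitR [t] ts = (t :: h0) :: tl0 := by
      rw [splitHead ts [t], hsh]; simp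
    constructor
    · by_cases h : t = "\""
      · subst h
        simp only [gSt, splitR, if_pos]
        rw [ih2 "", ← procPairs_eq_FFp_empty]
        simp [FF]
      · simp only [gSt, splitR, h, ite_false]
        rw [ih1, hsh]
        simp only [List.nil_append]
        rw [hsht]
        simp [FF]
    · intro part
      by_cases h : t = "\""
      · subst h
        simp only [gSt, splitR, if_pos]
        rw [ih1, hsh]
        simp [FF, FFp, joinSp]
      · simp only [gSt, splitR, h, ite_false]
        rw [ih2, hsh]
        simp only [List.nil_append]
        rw [hsht]
        cases tl0 with
        | nil => simp [FFp]
        | cons o r => simp [FFp, joinSp, String.append_assoc]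

-- ===== VERDICT (by name: the statement is the Claim_ definition above) =====
theorem gather0_spec : Claim_equal_gather0 := by
  intro Toks _
  unfold Spec_gather0 gather0 gather0_alt
  rw [(gather0_foldA Toks).1 [] "", rebuild_eq, splitFold Toks [] []]
  simp only [List.nil_append]
  exact (gSt_eq_FF Toks).1
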